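-- pv_equiv track=rewrite | github.com/victorhdamian/python | pyplay/enum_zip_annual_births.py | annual_births_average
-- ===== SOURCE A (Python) =====
-- years = [2010, 2011, 2012, 2013, 2014, 2015, 2016, 2017, 2018, 2019]
--
-- births = [723_165, 723_913, 729_674, 698_512, 695_233, 697_852, 696_271, 679_106, 657_076, 640_370]
--
-- def annual_births_average(year=years, births=births):
--     result = []
--     sum = 0
--     for index,  (year, birth) in enumerate(zip(years,births), start=1):
--       sum += birth
--       avg = round(sum/index)
--       result.append((year,birth,avg))
--     return result
-- ===== SOURCE B (Python) =====
-- years = [2010, 2011, 2012, 2013, 2014, 2015, 2016, 2017, 2018, 2019]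
--
-- births = [723_165, 723_913, 729_674, 698_512, 695_233, 697_852, 696_271, 679_106, 657_076, 640_370]
--
-- def annual_births_average(year=years, births=births):
--     # No running accumulator: each row's average is computed independently
--     # from a fresh slice sum over the rows up to that index (nested scans).
--     # Like the original, the years come from the module-level global `years`
--     # (the parameter named `year` is ignored), births from the parameter.
--     rows = list(zip(years, births))
--     return [(y, b, round(sum(p[1] for p in rows[:i + 1]) / (i + 1)))
--             for i, (y, b) in enumerate(rows)]
-- ===== Notes on version B (the rewrite author's own statement) =====
-- stated objective: alternative
-- what changed: Replaces A's single pass with a mutated running-sum accumulator by an accumulator-free formulation: each row's average is recomputed independently as round(sum(rows[:i+1])/(i+1)) via a fresh slice sum (nested scans, O(n^2)); A's quirk of reading the global `years` (the `year` parameter is ignored) is reproduced.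
import Mathlib
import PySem

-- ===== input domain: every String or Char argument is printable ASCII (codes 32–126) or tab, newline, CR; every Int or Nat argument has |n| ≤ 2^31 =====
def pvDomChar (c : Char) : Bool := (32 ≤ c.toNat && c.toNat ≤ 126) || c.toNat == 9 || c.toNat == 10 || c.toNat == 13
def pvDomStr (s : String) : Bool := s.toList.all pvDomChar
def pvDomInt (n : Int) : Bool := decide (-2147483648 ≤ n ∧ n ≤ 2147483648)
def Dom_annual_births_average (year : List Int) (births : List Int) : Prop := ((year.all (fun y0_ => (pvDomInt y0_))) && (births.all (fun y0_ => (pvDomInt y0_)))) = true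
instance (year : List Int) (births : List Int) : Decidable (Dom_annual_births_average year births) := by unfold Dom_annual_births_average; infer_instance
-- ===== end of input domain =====

-- ===== PORT A =====
-- B drops A's running-sum accumulator and recomputes each row's average from a fresh
-- slice sum rows[:i+1] (objective: alternative; B is O(n^2), not faster).
-- Both functions, like the Python, take the years from the module-level global `years`
-- (the `year` parameter is ignored) and the births from the `births` parameter.
-- Python's round(c/(i+1)) is ported as exact half-to-even rounding of the rational c/(i+1):
-- on the admitted domain (|ints| ≤ 2^31, ≤ 10 rows) the float quotient rounds identically.
def yearsG : List Int := [2010, 2011, 2012, 2013, 2014, 2015, 2016, 2017, 2018, 2019]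

/-- round(s/i) for i > 0, half to even, exact rational arithmetic. -/
def pyRound (s i : Int) : Int :=
  let q := PySem.Int.floordiv s i
  let r := PySem.Int.mod s i
  if 2 * r < i then q
  else if i < 2 * r then q + 1
  else if q % 2 = 0 then q else q + 1

def abaLoop : List (Int × Int) → Int → Int → List (Int × Int × Int) → List (Int × Int × Int)
  | [], _, _, res => res
  | (y, b) :: rest, idx, s, res =>
    let s' := s + b
    abaLoop rest (idx + 1) s' (res ++ [(y, b, pyRound s' idx)])

def annual_births_average (year : List Int) (births : List Int) : List (Int × Int × Int) :=
  abaLoop (yearsG.zip births) 1 0 []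

-- ===== PORT B =====
def annual_births_average_alt (year : List Int) (births : List Int) : List (Int × Int × Int) :=
  let rows := yearsG.zip births
  (PySem.List.enumerate rows 0).map
    (fun p => (p.2.1, p.2.2,
      pyRound (((PySem.List.slice rows none (some (p.1 + 1))).map Prod.snd).sum) (p.1 + 1)))

-- ===== PRECONDITION & SPEC =====
def Spec_annual_births_average (year : List Int) (births : List Int) (out : List (Int × Int × Int)) : Prop := out = annual_births_average_alt year births
instance (year : List Int) (births : List Int) (out : List (Int × Int × Int)) : Decidable (Spec_annual_births_average year births out) := by unfold Spec_annual_births_average; infer_instance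

-- ===== CLAIM (what is proved, stated in full; the proofs are below) =====
def Claim_equal_annual_births_average : Prop := ∀ (year : List Int) (births : List Int), Dom_annual_births_average year births → Spec_annual_births_average year births (annual_births_average year births)

-- ===== LEMMAS AND PROOFS =====
/-- Reference shape: row k carries pyRound of the running sum (proof-side only). -/
def refRows (s : Int) (k : Int) : List (Int × Int) → List (Int × Int × Int)
  | [] => []
  | (y, b) :: rest => (y, b, pyRound (s + b) k) :: refRows (s + b) (k + 1) rest

theorem abaLoop_eq_ref (rows : List (Int × Int)) (idx s : Int) (res : List (Int × Int × Int)) :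
    abaLoop rows idx s res = res ++ refRows s idx rows := by
  induction rows generalizing idx s res with
  | nil => simp [abaLoop, refRows]
  | cons r rest ih =>
    obtain ⟨y, b⟩ := r
    simp [abaLoop, refRows, ih]

theorem mapEnum_eq_ref (rows pre : List (Int × Int)) :
    (PySem.List.enumerate rows (pre.length : Int)).map
      (fun p => (p.2.1, p.2.2,
        pyRound (((PySem.List.slice (pre ++ rows) none (some (p.1 + 1))).map Prod.snd).sum) (p.1 + 1)))
    = refRows ((pre.map Prod.snd).sum) ((pre.length : Int) + 1) rows := by
  induction rows generalizing pre with
  | nil => simp [PySem.List.enumerate_nil, refRows]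
  | cons r rest ih =>
    obtain ⟨y, b⟩ := r
    rw [PySem.List.enumerate_cons, List.map_cons, refRows]
    congr 1
    · -- head row: the slice is exactly pre ++ [(y, b)]
      have hcast : ((pre.length : Int) + 1) = ((pre.length + 1 : Nat) : Int) := by push_cast; ring
      rw [hcast, PySem.List.slice_to_natCast]
      have htake : (pre ++ (y, b) :: rest).take (pre.length + 1) = pre ++ [(y, b)] := by
        simp [List.take_append]
      rw [htake]
      simp
    · -- tail: apply the IH with pre ++ [(y, b)]
      have h := ih (pre ++ [(y, b)])
      simp only [List.length_append, List.length_singleton, List.append_assoc,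
        List.singleton_append, List.map_append, List.sum_append, List.map_cons,
        List.map_nil, List.sum_cons, List.sum_nil] at h
      have hc : ((pre.length + 1 : Nat) : Int) = (pre.length : Int) + 1 := by push_cast; ring
      rw [hc] at h
      rw [h]
      ring_nf

-- ===== VERDICT (by name: the statement is the Claim_ definition above) =====
theorem annual_births_average_spec : Claim_equal_annual_births_average := by
  intro year births _
  unfold Spec_annual_births_average annual_births_average annual_births_average_alt
  rw [abaLoop_eq_ref]
  have h := mapEnum_eq_ref (yearsG.zip births) []
  simpa using h.symm
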